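-- pv_equiv track=rewrite | github.com/justinsvegliato/safe-metareasoning | resolver.py | filter_by_interference
-- ===== SOURCE A (Python) =====
-- def filter_by_interference(parameters, preferences):
--     interference_matrix = {}
--
--     for parameter in parameters:
--         values = [preference[parameter]['interference'] for preference in preferences]
--         descending_values = sorted(values, reverse=True)
--         interference_matrix[parameter] = descending_values
--
--     for index in range(len(preferences)):
--         highest_severity_column = [interference_matrix[parameter][index] for parameter in interference_matrix]
--
--         minimum_value = min(highest_severity_column)
--
--         new_value_matrix = {}
--         for parameter, values in interference_matrix.items():
--             if values[index] == minimum_value: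
--                 new_value_matrix[parameter] = values
--
--         interference_matrix = new_value_matrix
--
--     return list(interference_matrix.keys())
-- ===== SOURCE B (Python) =====
-- def filter_by_interference(parameters, preferences):
--     interference_matrix = {}
--     for parameter in parameters:
--         values = [preference[parameter]['interference'] for preference in preferences]
--         interference_matrix[parameter] = sorted(values, reverse=True)
--
--     if not interference_matrix:
--         return []
--
--     best = min(interference_matrix.values())
--     return [parameter for parameter in interference_matrix
--             if interference_matrix[parameter] == best]
-- ===== Notes on version B (the rewrite author's own statement) =====
-- stated objective: simpler
-- what changed: B replaces A's iterative column-by-column elimination loop (rebuilding the dict once per preference) with a single min over the sorted interference vectors followed by one equality filter over the matrix keys.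
import Mathlib
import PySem

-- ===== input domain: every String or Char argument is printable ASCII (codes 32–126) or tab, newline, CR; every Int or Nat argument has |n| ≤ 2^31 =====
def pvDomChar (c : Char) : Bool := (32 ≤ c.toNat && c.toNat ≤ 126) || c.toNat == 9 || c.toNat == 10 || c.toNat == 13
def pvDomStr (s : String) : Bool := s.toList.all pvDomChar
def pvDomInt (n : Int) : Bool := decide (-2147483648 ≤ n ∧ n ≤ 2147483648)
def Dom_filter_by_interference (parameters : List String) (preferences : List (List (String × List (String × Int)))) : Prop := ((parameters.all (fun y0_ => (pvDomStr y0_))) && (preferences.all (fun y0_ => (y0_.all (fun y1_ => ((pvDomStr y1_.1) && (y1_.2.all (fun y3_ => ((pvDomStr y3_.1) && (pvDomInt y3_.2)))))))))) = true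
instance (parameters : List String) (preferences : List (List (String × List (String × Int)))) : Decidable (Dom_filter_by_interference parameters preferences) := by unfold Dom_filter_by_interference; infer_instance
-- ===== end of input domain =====

-- B replaces A's column-by-column elimination loop with a single min over the sorted
-- interference vectors and one equality filter; same asymptotic cost, simpler code.

-- ===== PORT A =====
-- preference[parameter]['interference']  (total form; Pre_ guarantees both keys are present)
def pvInterf (pref : List (String × List (String × Int))) (p : String) : Int :=
  ((PySem.Dict.mk (((PySem.Dict.mk pref).get? p).getD [])).get? "interference").getD 0

-- the first loop, shared verbatim by A and B: matrix[parameter] = sorted(values, reverse=True)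
def pvMatrix (parameters : List String) (preferences : List (List (String × List (String × Int)))) :
    PySem.Dict String (List Int) :=
  parameters.foldl (fun m p =>
    m.insert p (PySem.List.sorted (preferences.map (fun pref => pvInterf pref p)) (fun x => x) true))
    PySem.Dict.empty

def filter_by_interference (parameters : List String) (preferences : List (List (String × List (String × Int)))) : List String :=
  let final := (PySem.List.pyRange 0 preferences.length 1).foldl (fun m idx =>
    let col := m.keys.map (fun p => PySem.List.pyGetD (m.getD p []) idx 0)
    let minv := (PySem.List.min? col (fun x => x)).getD 0
    m.items.foldl (fun nm kv =>
      if PySem.List.pyGetD kv.2 idx 0 == minv then nm.insert kv.1 kv.2 else nm)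
      PySem.Dict.empty) (pvMatrix parameters preferences)
  final.keys

-- ===== PORT B =====
def filter_by_interference_alt (parameters : List String) (preferences : List (List (String × List (String × Int)))) : List String :=
  let m := pvMatrix parameters preferences
  if m.items.isEmpty then []
  else
    let best := (PySem.List.min? m.values (fun v => v)).getD []
    m.keys.filter (fun p => m.getD p [] == best)

-- ===== PRECONDITION & SPEC =====
-- Pre_ excludes exactly the inputs on which A raises: a KeyError when some preference is
-- missing a parameter key or its 'interference' entry, and the ValueError from min([])
-- when parameters is empty while preferences is not.
def Pre_filter_by_interference (parameters : List String) (preferences : List (List (String × List (String × Int)))) : Prop :=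
  (parameters = [] → preferences = []) ∧
  ∀ pref ∈ preferences, ∀ p ∈ parameters,
    (((PySem.Dict.mk pref).get? p).bind (fun d => (PySem.Dict.mk d).get? "interference")).isSome = true
instance (parameters : List String) (preferences : List (List (String × List (String × Int)))) : Decidable (Pre_filter_by_interference parameters preferences) := by unfold Pre_filter_by_interference; infer_instance

def pvWitness_filter_by_interference : List String × (List (List (String × List (String × Int)))) :=
  (["a", "b"], [[("a", [("interference", 2)]), ("b", [("interference", 1)])]])

def Spec_filter_by_interference (parameters : List String) (preferences : List (List (String × List (String × Int)))) (out : List String) : Prop := out = filter_by_interference_alt parameters preferences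
instance (parameters : List String) (preferences : List (List (String × List (String × Int)))) (out : List String) : Decidable (Spec_filter_by_interference parameters preferences out) := by unfold Spec_filter_by_interference; infer_instance

-- ===== CLAIM (what is proved, stated in full; the proofs are below) =====
def Claim_equal_filter_by_interference : Prop := ∀ (parameters : List String) (preferences : List (List (String × List (String × Int)))), Dom_filter_by_interference parameters preferences → Pre_filter_by_interference parameters preferences → Spec_filter_by_interference parameters preferences (filter_by_interference parameters preferences)

-- ===== LEMMAS AND PROOFS =====

-- the list-level image of A's elimination step (used only in the proofs)
def pvStepL (idx : Int) (L : List (String × List Int)) : List (String × List Int) :=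
  L.filter (fun kv => PySem.List.pyGetD kv.2 idx 0 ==
    (PySem.List.min? (L.map (fun kv => PySem.List.pyGetD kv.2 idx 0)) (fun x => x)).getD 0)

-- a conditional insert-fold is a fold over the filtered list
theorem pv_foldl_if {α β : Type} (l : List α) (c : α → Bool) (g : β → α → β) (init : β) :
    l.foldl (fun acc x => if c x then g acc x else acc) init = (l.filter c).foldl g init := by
  induction l generalizing init with
  | nil => rfl
  | cons x t ih =>
    by_cases h : c x <;> simp [h, ih]

-- min over a list (id key) under the core List.instLT order: membership and minimality
def pvMinStep (acc : Option (List Int)) (x : List Int) : Option (List Int) :=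
  acc.elim (some x) (fun q => if x < q then some x else some q)

theorem pv_min?_eq (xs : List (List Int)) :
    PySem.List.min? xs (fun v => v) = xs.foldl pvMinStep none := by
  unfold PySem.List.min?
  congr 1
  funext acc x
  cases acc <;> rfl

theorem pv_min_aux (t : List (List Int)) (a m : List Int)
    (h : t.foldl pvMinStep (some a) = some m) :
    (m = a ∨ m ∈ t) ∧ (∀ y ∈ t, ¬ y < m) ∧ (m = a ∨ m < a) := by
  induction t generalizing a with
  | nil => simp_all
  | cons x t ih =>
    simp only [List.foldl_cons] at h
    by_cases hx : x < a
    · rw [show pvMinStep (some a) x = some x by simp [pvMinStep, hx]] at h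
      obtain ⟨h1, h2, h3⟩ := ih x h
      refine ⟨?_, ?_, ?_⟩
      · rcases h1 with h1 | h1
        · exact Or.inr (by simp [h1])
        · exact Or.inr (by simp [h1])
      · intro y hy
        rcases List.mem_cons.mp hy with rfl | hy
        · rcases h3 with rfl | h3
          · exact lt_irrefl _
          · exact fun hc => lt_asymm h3 hc
        · exact h2 y hy
      · rcases h3 with rfl | h3
        · exact Or.inr hx
        · exact Or.inr (lt_trans h3 hx)
    · rw [show pvMinStep (some a) x = some a by simp [pvMinStep, hx]] at h
      obtain ⟨h1, h2, h3⟩ := ih a h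
      refine ⟨?_, ?_, ?_⟩
      · exact h1.imp id (List.mem_cons_of_mem x)
      · intro y hy
        rcases List.mem_cons.mp hy with rfl | hy
        · intro hc
          rcases h3 with rfl | h3
          · exact hx hc
          · exact hx (lt_trans hc h3)
        · exact h2 y hy
      · exact h3

theorem pv_min_some (t : List (List Int)) (a : List Int) :
    ∃ m, t.foldl pvMinStep (some a) = some m := by
  induction t generalizing a with
  | nil => exact ⟨a, rfl⟩
  | cons x t ih =>
    simp only [List.foldl_cons]
    by_cases hx : x < a
    · rw [show pvMinStep (some a) x = some x by simp [pvMinStep, hx]]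
      exact ih x
    · rw [show pvMinStep (some a) x = some a by simp [pvMinStep, hx]]
      exact ih a

theorem pv_minL_spec (x : List Int) (xs : List (List Int)) :
    ∃ m, PySem.List.min? (x :: xs) (fun v => v) = some m ∧ m ∈ x :: xs ∧ ∀ y ∈ x :: xs, ¬ y < m := by
  obtain ⟨m, hm⟩ := pv_min_some xs x
  refine ⟨m, ?_, ?_, ?_⟩
  · rw [pv_min?_eq]
    simpa [pvMinStep] using hm
  · rcases (pv_min_aux xs x m hm).1 with rfl | h
    · exact List.mem_cons_self
    · exact List.mem_cons_of_mem _ h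
  · intro y hy
    rcases List.mem_cons.mp hy with h' | hy'
    · intro hc
      have hxm : x < m := h' ▸ hc
      rcases (pv_min_aux xs x m hm).2.2 with h'' | h''
      · exact lt_irrefl x (h'' ▸ hxm)
      · exact lt_asymm h'' hxm
    · exact (pv_min_aux xs x m hm).2.1 y hy' 

-- strict lexicographic comparison from an equal prefix and a smaller element
theorem pv_lex_lt (k : Nat) (x y : List Int) (hk1 : k < x.length) (hk2 : k < y.length)
    (hpre : x.take k = y.take k) (hlt : x[k] < y[k]) : x < y := by
  induction k generalizing x y with
  | zero =>
    match x, y with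
    | a :: xs, b :: ys => exact List.Lex.rel (by simpa using hlt)
  | succ k ih =>
    match x, y with
    | a :: xs, b :: ys =>
      simp only [List.take_succ_cons, List.cons.injEq] at hpre
      obtain ⟨rfl, hpre⟩ := hpre
      exact List.Lex.cons (ih xs ys (by simpa using hk1) (by simpa using hk2) hpre (by simpa using hlt))

-- x.take (k+1) = y.take (k+1)  ↔  equal length-k prefixes and equal k-th entries
theorem pv_take_succ_iff (k : Nat) (x y : List Int) (hk1 : k < x.length) (hk2 : k < y.length) :
    x.take (k + 1) = y.take (k + 1) ↔ (x.take k = y.take k ∧ x[k] = y[k]) := by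
  rw [List.take_add_one, List.take_add_one, List.getElem?_eq_getElem hk1, List.getElem?_eq_getElem hk2]
  simp only [Option.toList_some, ← List.concat_eq_append, List.concat_inj]

-- ONE elimination step on the survivors with minimal length-k prefix
theorem pv_step (k : Nat) (L : List (String × List Int)) (b : List Int)
    (hmem : b ∈ L.map (fun kv => kv.2)) (hmin : ∀ y ∈ L.map (fun kv => kv.2), ¬ y < b)
    (hlen : ∀ kv ∈ L, kv.2.length = b.length) (hk : k < b.length) :
    pvStepL (k : Int) (L.filter (fun kv => kv.2.take k == b.take k)) =
      L.filter (fun kv => kv.2.take (k + 1) == b.take (k + 1)) := by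
  obtain ⟨kvb, hkvbL, hkvb2⟩ := List.mem_map.mp hmem
  set S := L.filter (fun kv => kv.2.take k == b.take k) with hS
  have hSkvb : kvb ∈ S := List.mem_filter.mpr ⟨hkvbL, by simp [hkvb2]⟩
  -- every surviving row has its k-th entry ≥ b[k]
  have hgek : ∀ kv ∈ S, b[k] ≤ PySem.List.pyGetD kv.2 (k : Int) 0 := by
    intro kv hkvS
    have hkvL : kv ∈ L := (List.mem_filter.mp hkvS).1
    have htk : kv.2.take k = b.take k := by
      have := (List.mem_filter.mp hkvS).2
      simpa using this
    have hlk : k < kv.2.length := by rw [hlen kv hkvL]; exact hk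
    rw [PySem.List.pyGetD_natCast, List.getD_eq_getElem _ _ hlk]
    by_contra hcon
    simp only [not_le] at hcon
    exact hmin kv.2 (List.mem_map.mpr ⟨kv, hkvL, rfl⟩) (pv_lex_lt k kv.2 b hlk hk htk hcon)
  -- the column minimum is exactly b[k]
  have hbcol : b[k] ∈ S.map (fun kv => PySem.List.pyGetD kv.2 (k : Int) 0) := by
    refine List.mem_map.mpr ⟨kvb, hSkvb, ?_⟩
    have hlkb : k < kvb.2.length := by rw [hlen kvb hkvbL]; exact hk
    rw [PySem.List.pyGetD_natCast, List.getD_eq_getElem _ _ hlkb]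
    simp [hkvb2]
  rcases hmv : PySem.List.min? (S.map (fun kv => PySem.List.pyGetD kv.2 (k : Int) 0)) (fun x => x)
    with _ | mv
  · rw [PySem.List.min?_eq_none_iff] at hmv
    rw [hmv] at hbcol
    exact absurd hbcol (List.not_mem_nil)
  have hmveq : mv = b[k] := by
    obtain ⟨kv0, hkv0S, hkv0⟩ := List.mem_map.mp (PySem.List.min?_mem hmv)
    have h1 : mv ≤ b[k] := by
      have := PySem.List.min?_isMin hmv _ hbcol
      simpa using this
    have h2 : b[k] ≤ mv := by
      rw [← hkv0]
      exact hgek kv0 hkv0S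
    exact le_antisymm h1 h2
  -- assemble
  rw [pvStepL, hmv]
  simp only [Option.getD_some, hmveq, hS, List.filter_filter]
  apply List.filter_congr
  intro kv hkvL
  have hlk : k < kv.2.length := by rw [hlen kv hkvL]; exact hk
  rw [PySem.List.pyGetD_natCast, List.getD_eq_getElem _ _ hlk]
  have hiff := pv_take_succ_iff k kv.2 b hlk hk
  rcases h1 : (kv.2.take k == b.take k) with _ | _
  · have hne : ¬ kv.2.take (k+1) = b.take (k+1) := by
      intro hcon
      have := (hiff.mp hcon).1
      simp [this] at h1
    simp [hne]
  · have heq : kv.2.take k = b.take k := by simpa using h1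
    have : (kv.2.take (k+1) = b.take (k+1)) ↔ kv.2[k] = b[k] := by
      rw [hiff]; simp [heq]
    by_cases h2 : kv.2[k] = b[k]
    · simp [h2, this.mpr h2]
    · have : ¬ kv.2.take (k+1) = b.take (k+1) := fun hc => h2 (this.mp hc)
      simp [h2, this]
theorem pv_core_inv (n : Nat) (L : List (String × List Int)) (b : List Int)
    (hmem : b ∈ L.map (fun kv => kv.2)) (hmin : ∀ y ∈ L.map (fun kv => kv.2), ¬ y < b)
    (hlen : ∀ kv ∈ L, kv.2.length = n) (hbn : b.length = n)
    (k : Nat) (hkn : k ≤ n) :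
    (PySem.List.pyRange 0 k 1).foldl (fun S idx => pvStepL idx S) L =
      L.filter (fun kv => kv.2.take k == b.take k) := by
  induction k with
  | zero =>
    rw [PySem.List.pyRange_one_eq_nil (by simp)]
    simp
  | succ k ih =>
    have hk : k < b.length := by omega
    have h1 : ((k : Int) + 1 : Int) = ((k + 1 : Nat) : Int) := by push_cast; ring
    rw [← h1, PySem.List.pyRange_one_succ_right (by positivity), List.foldl_append]
    rw [ih (by omega)]
    simpa using pv_step k L b hmem hmin (fun kv h => by rw [hlen kv h, ← hbn]) hk

theorem pv_core (n : Nat) (L : List (String × List Int)) (b : List Int)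
    (hmem : b ∈ L.map (fun kv => kv.2)) (hmin : ∀ y ∈ L.map (fun kv => kv.2), ¬ y < b)
    (hlen : ∀ kv ∈ L, kv.2.length = n) (hbn : b.length = n) :
    (PySem.List.pyRange 0 n 1).foldl (fun S idx => pvStepL idx S) L =
      L.filter (fun kv => kv.2 == b) := by
  rw [pv_core_inv n L b hmem hmin hlen hbn n le_rfl]
  apply List.filter_congr
  intro kv hkv
  rw [show kv.2.take n = kv.2 by rw [← hlen kv hkv]; exact List.take_length,
      show b.take n = b by rw [← hbn]; exact List.take_length]

-- ONE dict-level elimination step of A computes pvStepL on the items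
theorem pv_dict_step (d : PySem.Dict String (List Int)) (idx : Int) (hnd : d.keys.Nodup) :
    (d.items.foldl (fun nm kv =>
      if PySem.List.pyGetD kv.2 idx 0 ==
          (PySem.List.min? (d.keys.map (fun p => PySem.List.pyGetD (d.getD p []) idx 0))
            (fun x => x)).getD 0
        then nm.insert kv.1 kv.2 else nm) PySem.Dict.empty).items = pvStepL idx d.items := by
  have hcol : d.keys.map (fun p => PySem.List.pyGetD (d.getD p []) idx 0) =
      d.items.map (fun kv => PySem.List.pyGetD kv.2 idx 0) := by
    rw [PySem.Dict.items_eq_map_keys d hnd [], List.map_map]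
    rfl
  rw [hcol, pv_foldl_if, pvStepL]
  rw [PySem.Dict.items_foldl_insert_fresh _ Prod.fst Prod.snd PySem.Dict.empty
    (fun a _ => PySem.Dict.contains_empty a.1) ?nodup]
  case nodup =>
    have hsub : ((d.items.filter (fun kv => PySem.List.pyGetD kv.2 idx 0 ==
        (PySem.List.min? (d.items.map (fun kv => PySem.List.pyGetD kv.2 idx 0))
          (fun x => x)).getD 0)).map Prod.fst).Sublist (d.items.map Prod.fst) :=
      List.filter_sublist.map Prod.fst
    exact hsub.nodup hnd
  simp [PySem.Dict.empty]

theorem pv_dict_fold (idxs : List Int) (d : PySem.Dict String (List Int))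
    (hnd : d.keys.Nodup) :
    (idxs.foldl (fun m idx =>
      let col := m.keys.map (fun p => PySem.List.pyGetD (m.getD p []) idx 0)
      let minv := (PySem.List.min? col (fun x => x)).getD 0
      m.items.foldl (fun nm kv =>
        if PySem.List.pyGetD kv.2 idx 0 == minv then nm.insert kv.1 kv.2 else nm)
        PySem.Dict.empty) d).items = idxs.foldl (fun S idx => pvStepL idx S) d.items := by
  induction idxs generalizing d with
  | nil => rfl
  | cons idx rest ih =>
    simp only [List.foldl_cons]
    set d' := (d.items.foldl (fun nm kv =>
      if PySem.List.pyGetD kv.2 idx 0 ==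
          (PySem.List.min? (d.keys.map (fun p => PySem.List.pyGetD (d.getD p []) idx 0))
            (fun x => x)).getD 0
        then nm.insert kv.1 kv.2 else nm) PySem.Dict.empty) with hd'
    have hstep : d'.items = pvStepL idx d.items := pv_dict_step d idx hnd
    have hnd' : d'.keys.Nodup := by
      show (d'.items.map (fun p => p.1)).Nodup
      rw [hstep, pvStepL]
      exact ((List.filter_sublist.map _).nodup (by exact hnd))
    rw [ih d' hnd', hstep]

theorem pv_matrix_len_aux (prefs : List (List (String × List (String × Int)))) (params : List String)
    (d : PySem.Dict String (List Int)) (hd : ∀ kv ∈ d.items, kv.2.length = prefs.length) :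
    ∀ kv ∈ (params.foldl (fun m p =>
      m.insert p (PySem.List.sorted (prefs.map (fun pref => pvInterf pref p)) (fun x => x) true))
      d).items, kv.2.length = prefs.length := by
  induction params generalizing d with
  | nil => exact hd
  | cons p rest ih =>
    simp only [List.foldl_cons]
    apply ih
    intro kv hkv
    rcases (PySem.Dict.mem_items_insert _ _ _ _).mp hkv with rfl | ⟨h, _⟩
    · simp [PySem.List.length_sorted]
    · exact hd kv h

theorem pv_matrix_len (parameters : List String) (preferences : List (List (String × List (String × Int)))) :
    ∀ kv ∈ (pvMatrix parameters preferences).items, kv.2.length = preferences.length := by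
  unfold pvMatrix
  exact pv_matrix_len_aux preferences parameters PySem.Dict.empty (by simp [PySem.Dict.empty])

theorem pv_matrix_nodup (parameters : List String) (preferences : List (List (String × List (String × Int)))) :
    (pvMatrix parameters preferences).keys.Nodup := by
  unfold pvMatrix
  exact PySem.Dict.nodup_keys_foldl_insert parameters
    (fun _ p => PySem.List.sorted (preferences.map (fun pref => pvInterf pref p)) (fun x => x) true)
    PySem.Dict.empty PySem.Dict.nodup_keys_empty

theorem pv_matrix_keys (parameters : List String) (preferences : List (List (String × List (String × Int)))) :
    (pvMatrix parameters preferences).keys = PySem.Set.ofList parameters := by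
  unfold pvMatrix
  rw [PySem.Dict.keys_foldl_insert parameters
    (fun _ p => PySem.List.sorted (preferences.map (fun pref => pvInterf pref p)) (fun x => x) true)
    PySem.Dict.empty]
  rw [show (PySem.Dict.empty : PySem.Dict String (List Int)).keys = [] from rfl,
    PySem.Set.update_nil_left]

theorem pv_matrix_ne (parameters : List String) (preferences : List (List (String × List (String × Int))))
    (h : parameters ≠ []) : (pvMatrix parameters preferences).items ≠ [] := by
  intro hcon
  have hk : (pvMatrix parameters preferences).keys = [] := by
    show (pvMatrix parameters preferences).items.map _ = []
    rw [hcon]; rfl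
  rw [pv_matrix_keys] at hk
  match parameters, h with
  | p :: rest, _ =>
    rw [PySem.Set.ofList_cons] at hk
    exact List.cons_ne_nil _ _ hk

-- ===== VERDICT (by name: the statement is the Claim_ definition above) =====
theorem filter_by_interference_spec : Claim_equal_filter_by_interference := by
  intro params prefs hdom hpre
  unfold Spec_filter_by_interference filter_by_interference filter_by_interference_alt
  by_cases hp : params = []
  · subst hp
    have h0 := hpre.1 rfl
    subst h0
    rfl
  · have hnd := pv_matrix_nodup params prefs
    have hlen := pv_matrix_len params prefs
    have hne := pv_matrix_ne params prefs hp
    rcases hI : (pvMatrix params prefs).items with _ | ⟨kv0, tl⟩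
    · exact absurd hI hne
    have hvals : (pvMatrix params prefs).values = kv0.2 :: tl.map (fun kv => kv.2) := by
      show (pvMatrix params prefs).items.map _ = _
      rw [hI]
      rfl
    obtain ⟨b, hb, hbmem, hbmin⟩ := pv_minL_spec kv0.2 (tl.map (fun kv => kv.2))
    have hbmem' : b ∈ (pvMatrix params prefs).items.map (fun kv => kv.2) := by
      rw [hI]; simpa using hbmem
    have hbmin' : ∀ y ∈ (pvMatrix params prefs).items.map (fun kv => kv.2), ¬ y < b := by
      rw [hI]; simpa using hbmin
    have hbn : b.length = prefs.length := by
      obtain ⟨kv, hkv, rfl⟩ := List.mem_map.mp hbmem'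
      exact hlen kv hkv
    have hmin? : PySem.List.min? (pvMatrix params prefs).values (fun v => v) = some b := by
      rw [hvals]; exact hb
    -- A's elimination fold, reduced to the list level and then to the b-filter
    have hA : ((PySem.List.pyRange 0 (prefs.length) 1).foldl (fun m idx =>
        let col := m.keys.map (fun p => PySem.List.pyGetD (m.getD p []) idx 0)
        let minv := (PySem.List.min? col (fun x => x)).getD 0
        m.items.foldl (fun nm kv =>
          if PySem.List.pyGetD kv.2 idx 0 == minv then nm.insert kv.1 kv.2 else nm)
          PySem.Dict.empty) (pvMatrix params prefs)).items =
        (pvMatrix params prefs).items.filter (fun kv => kv.2 == b) := by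
      rw [pv_dict_fold _ _ hnd]
      exact pv_core prefs.length (pvMatrix params prefs).items b hbmem' hbmin' hlen hbn
    -- B's key filter equals the fst-image of the same item filter
    have hB : (pvMatrix params prefs).keys.filter
          (fun p => (pvMatrix params prefs).getD p [] == b) =
        ((pvMatrix params prefs).items.filter (fun kv => kv.2 == b)).map (fun p => p.1) := by
      conv_rhs => rw [PySem.Dict.items_eq_map_keys _ hnd []]
      rw [List.filter_map, List.map_map]
      simp [Function.comp_def]
    -- assemble
    have hEmpty : (pvMatrix params prefs).items.isEmpty = false := by rw [hI]; rfl
    show ((PySem.List.pyRange 0 (prefs.length) 1).foldl (fun m idx =>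
        let col := m.keys.map (fun p => PySem.List.pyGetD (m.getD p []) idx 0)
        let minv := (PySem.List.min? col (fun x => x)).getD 0
        m.items.foldl (fun nm kv =>
          if PySem.List.pyGetD kv.2 idx 0 == minv then nm.insert kv.1 kv.2 else nm)
          PySem.Dict.empty) (pvMatrix params prefs)).keys =
      if (pvMatrix params prefs).items.isEmpty then [] else
        (pvMatrix params prefs).keys.filter (fun p => (pvMatrix params prefs).getD p [] ==
          (PySem.List.min? (pvMatrix params prefs).values (fun v => v)).getD [])
    rw [show ∀ (d : PySem.Dict String (List Int)), d.keys = d.items.map (fun p => p.1)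
        from fun _ => rfl, hA, hEmpty, hmin?]
    simp only [Bool.false_eq_true, if_false, Option.getD_some]
    exact hB.symm
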